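-- pv_equiv track=rewrite | github.com/yj0903/python-for-coding-test | zerobase_week4/test4.py | solution
-- ===== SOURCE A (Python) =====
-- import heapq
--
-- def solution(start, time):
--     answer = []
--     now = 0
--     que = []
--     need = []
--
--     # 우선순위 큐에 모든 데이터 넣기
--     for i in range(len(start)):
--         heapq.heappush(que, [start[i], time[i], i])
--
--     # 첫번째 작업
--     s, t, i = heapq.heappop(que)
--     heapq.heappush(need, [t, i])
--
--     while True:
--         # 작업 종료
--         if len(need) == 0 and len(que) == 0:
--             break
--
--         while need:
--             if (len(need) >= 2) and (need[0][0] == need[1][0]) and (need[0][1] > need[1][1]):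
--                 t1, i1 = heapq.heappop(need)
--                 t, i = heapq.heappop(need)
--                 heapq.heappush(need, [t1, i1])
--             else:
--                 t, i = heapq.heappop(need)
--             now += t
--             answer.append(i)
--
--
--             # 수시로 큐 확인해주기
--             while (len(que) != 0) and now >= que[0][0]:
--                 s, t, i = heapq.heappop(que)
--                 heapq.heappush(need, [t, i])
--
--         now += 1
--     return answer
-- ===== SOURCE B (Python) =====
-- import heapq
--
-- def solution(start, time):
--     # Sort jobs once by (start, duration, index); walk them with a pointer and
--     # jump the clock across idle gaps instead of busy-waiting one tick at a time.
--     jobs = sorted((s, t, i) for i, (s, t) in enumerate(zip(start, time)))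
--     s0, t0, i0 = jobs[0]
--     ready = [(t0, i0)]
--     p = 1
--     now = 0
--     answer = []
--     while ready:
--         t, i = heapq.heappop(ready)
--         now += t
--         answer.append(i)
--         while p < len(jobs) and jobs[p][0] <= now:
--             heapq.heappush(ready, (jobs[p][1], jobs[p][2]))
--             p += 1
--         if not ready and p < len(jobs):
--             # idle gap: jump the clock straight to the next job's release time
--             now = jobs[p][0]
--             heapq.heappush(ready, (jobs[p][1], jobs[p][2]))
--             p += 1
--     return answer
-- ===== Notes on version B (the rewrite author's own statement) =====
-- stated objective: simpler
-- what changed: B sorts the jobs once and walks them with a pointer instead of keeping a second heap, drops A's dead tie-inspection branch, and jumps the clock straight to the next job's release instead of A's busy-wait loop that increments the clock by 1 forever (A never re-checks the queue there, so A diverges on any idle gap).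
-- outside the precondition, e.g. on solution([0, 2, 3], [3, -5, 1]): A returns [0, 1, 2], B returns [0, 1, 2]
import Mathlib
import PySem

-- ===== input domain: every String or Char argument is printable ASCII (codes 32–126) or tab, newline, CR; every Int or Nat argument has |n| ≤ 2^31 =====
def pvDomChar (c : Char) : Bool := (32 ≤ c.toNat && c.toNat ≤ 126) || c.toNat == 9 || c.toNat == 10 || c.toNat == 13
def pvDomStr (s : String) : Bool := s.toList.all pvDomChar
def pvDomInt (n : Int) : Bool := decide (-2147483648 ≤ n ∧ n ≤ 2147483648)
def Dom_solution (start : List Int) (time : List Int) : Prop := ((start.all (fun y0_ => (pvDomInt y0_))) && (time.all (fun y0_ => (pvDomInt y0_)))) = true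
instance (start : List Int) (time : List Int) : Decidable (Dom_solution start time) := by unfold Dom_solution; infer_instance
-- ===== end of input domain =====

-- B sorts the jobs once and walks them with a pointer, drops A's dead tie branch, and
-- jumps the clock across idle gaps instead of A's +1 busy-wait (on which A never
-- re-checks the queue and loops forever; such inputs are outside Pre_solution).

-- ===== PORT A =====
-- Python list/tuple comparison, lexicographic (strict <)
def pvPLt (x y : Int × Int) : Bool := x.1 < y.1 || (x.1 == y.1 && x.2 < y.2)
def pvTLt (x y : Int × Int × Int) : Bool := x.1 < y.1 || (x.1 == y.1 && pvPLt x.2 y.2)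

-- heapq model: the heap's contents kept as an ascending list; heappush = ordered
-- insert, heappop = head.  Exact for the popped values (successive minima) and for
-- need[0]; need[1] becomes the 2nd-smallest element (in the real binary heap it is a
-- child ≥ the root, so A's tie test below is false in both representations).
def pvHeapPush {α : Type} (lt : α → α → Bool) (x : α) : List α → List α
  | [] => [x]
  | y :: ys => if lt x y then x :: y :: ys else y :: pvHeapPush lt x ys

theorem pvHeapPush_length {α : Type} (lt : α → α → Bool) (x : α) (h : List α) :
    (pvHeapPush lt x h).length = h.length + 1 := by
  induction h with
  | nil => simp [pvHeapPush]
  | cons y ys ih => simp [pvHeapPush]; split <;> simp [ih]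

-- A's inner release loop: while que and now >= que[0][0]: pop que, push [t,i] on need
def pvReleaseA : List (Int × Int × Int) → List (Int × Int) → Int →
    List (Int × Int × Int) × List (Int × Int)
  | [], need, _ => ([], need)
  | (s, t, i) :: rest, need, now =>
    if now ≥ s then pvReleaseA rest (pvHeapPush pvPLt (t, i) need) now
    else ((s, t, i) :: rest, need)

theorem pvReleaseA_length (q : List (Int × Int × Int)) (nd : List (Int × Int)) (now : Int) :
    (pvReleaseA q nd now).1.length + (pvReleaseA q nd now).2.length = q.length + nd.length := by
  induction q generalizing nd with
  | nil => simp [pvReleaseA]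
  | cons j rest ih =>
    obtain ⟨s, t, i⟩ := j
    simp only [pvReleaseA]
    split
    · rw [ih]; simp [pvHeapPush_length]; omega
    · simp

-- A's main loop (while True / while need); the tie-inspection branch is transliterated.
-- When need is empty and que is not, real A enters 'now += 1' forever without ever
-- re-checking que: it diverges; the port returns the answer built so far (outside Pre_).
def pvLoopA (que : List (Int × Int × Int)) (need : List (Int × Int)) (now : Int)
    (ans : List Int) : List Int :=
  match need with
  | [] => ans
  | (t0, i0) :: ntl =>
    match ntl with
    | (t1, i1) :: ntl2 =>
      if t0 == t1 && i0 > i1 then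
        -- A pops two, pushes the first back, keeps the second
        match hst : pvReleaseA que (pvHeapPush pvPLt (t0, i0) ntl2) (now + t1) with
        | (que', need') => pvLoopA que' need' (now + t1) (ans ++ [i1])
      else
        match hst : pvReleaseA que ((t1, i1) :: ntl2) (now + t0) with
        | (que', need') => pvLoopA que' need' (now + t0) (ans ++ [i0])
    | [] =>
      match hst : pvReleaseA que [] (now + t0) with
      | (que', need') => pvLoopA que' need' (now + t0) (ans ++ [i0])
termination_by que.length + need.length
decreasing_by
  · have h := pvReleaseA_length que (pvHeapPush pvPLt (t0, i0) ntl2) (now + t1)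
    rw [hst, pvHeapPush_length] at h; simp at h ⊢; omega
  · have h := pvReleaseA_length que ((t1, i1) :: ntl2) (now + t0)
    rw [hst] at h; simp at h ⊢; omega
  · have h := pvReleaseA_length que [] (now + t0)
    rw [hst] at h; simp at h ⊢; omega

-- start[i]/time[i] via getD is exact under Pre_ (i < start.length ≤ time.length);
-- with time shorter than start, or start = [], real A raises IndexError (outside Pre_).
def solution (start : List Int) (time : List Int) : List Int :=
  let que := (List.range start.length).foldl
    (fun q k => pvHeapPush pvTLt (start.getD k 0, time.getD k 0, (k : Int)) q) []
  match que with
  | [] => []  -- real A raises IndexError here (heappop of an empty heap)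
  | (_, t, i) :: rest => pvLoopA rest (pvHeapPush pvPLt (t, i) []) 0 []

-- ===== PORT B =====
-- sorted(<triples>): Python's stable sort under the lexicographic tuple order,
-- ported as PySem's sorted-fold (PySem.List.sorted is this insertBy fold; the lex
-- tuple comparison is supplied explicitly as pvTLt, cf. sorted_eq_foldl_insertBy)
def pvJobs (start : List Int) (time : List Int) : List (Int × Int × Int) :=
  ((start.zip time).zipIdx.map (fun p => (p.1.1, p.1.2, (p.2 : Int)))).foldl
    (fun acc x => PySem.List.insertBy pvTLt x acc) []

-- B's release loop: while p < len(jobs) and jobs[p][0] <= now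
def pvReleaseB : List (Int × Int × Int) → List (Int × Int) → Int →
    List (Int × Int × Int) × List (Int × Int)
  | [], ready, _ => ([], ready)
  | (s, t, i) :: rest, ready, now =>
    if s ≤ now then pvReleaseB rest (pvHeapPush pvPLt (t, i) ready) now
    else ((s, t, i) :: rest, ready)

theorem pvReleaseB_length (q : List (Int × Int × Int)) (rd : List (Int × Int)) (now : Int) :
    (pvReleaseB q rd now).1.length + (pvReleaseB q rd now).2.length = q.length + rd.length := by
  induction q generalizing rd with
  | nil => simp [pvReleaseB]
  | cons j rest ih =>
    obtain ⟨s, t, i⟩ := j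
    simp only [pvReleaseB]
    split
    · rw [ih]; simp [pvHeapPush_length]; omega
    · simp

-- B's main loop (while ready), with the idle-gap jump
def pvLoopB (rest : List (Int × Int × Int)) (ready : List (Int × Int)) (now : Int)
    (ans : List Int) : List Int :=
  match ready with
  | [] => ans
  | (t, i) :: rtl =>
    match hst : pvReleaseB rest rtl (now + t) with
    | (rest', ready') =>
      if h2 : ready' = [] then
        match hr : rest' with
        | (s2, t2, i2) :: rest2 =>
          -- idle gap: jump the clock to the next job's release time and push that job
          pvLoopB rest2 (pvHeapPush pvPLt (t2, i2) []) s2 (ans ++ [i])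
        | [] => pvLoopB rest' ready' (now + t) (ans ++ [i])
      else
        pvLoopB rest' ready' (now + t) (ans ++ [i])
termination_by rest.length + ready.length
decreasing_by
  all_goals have h := pvReleaseB_length rest rtl (now + t)
  all_goals rw [hst] at h
  all_goals simp only [List.length_cons, List.length_nil, pvHeapPush_length] at h ⊢
  · simp [h2] at h; omega
  · simp [h2, hr] at h ⊢
  · omega

def solution_alt (start : List Int) (time : List Int) : List Int :=
  match pvJobs start time with
  | [] => []  -- real B raises IndexError here (jobs[0]); start = [] is outside Pre_
  | (_, t0, i0) :: rest => pvLoopB rest [(t0, i0)] 0 []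

-- ===== PRECONDITION & SPEC =====
-- Pre_ excludes inputs on which A raises IndexError (empty start, or time shorter than
-- start) or loops forever (an idle gap: some job's start exceeds the total duration of
-- the earlier jobs in sorted order).  With negative durations A's termination depends on
-- the whole simulation and has no closed form, so Pre_ keeps only the prefix-sum
-- condition, which is exact for nonnegative durations; on excluded inputs where A does
-- return, B returns the same value anyway.
def Pre_solution (start : List Int) (time : List Int) : Prop :=
  0 < start.length ∧ start.length ≤ time.length ∧
  ∀ k ∈ List.range (start.length - 1),
    ((pvJobs start time).getD (k + 1) (0, 0, 0)).1 ≤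
      (((pvJobs start time).take (k + 1)).map (fun j => j.2.1)).sum
instance (start : List Int) (time : List Int) : Decidable (Pre_solution start time) := by
  unfold Pre_solution; infer_instance

def pvWitness_solution : List Int × List Int := ([0, 1, 2], [3, 1, 2])

def Spec_solution (start : List Int) (time : List Int) (out : List Int) : Prop :=
  out = solution_alt start time
instance (start : List Int) (time : List Int) (out : List Int) :
    Decidable (Spec_solution start time out) := by unfold Spec_solution; infer_instance

-- ===== CLAIM (what is proved, stated in full; the proofs are below) =====
def Claim_equal_solution : Prop := ∀ (start : List Int) (time : List Int),
  Dom_solution start time → Pre_solution start time →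
  Spec_solution start time (solution start time)

-- ===== LEMMAS AND PROOFS =====

-- order facts for the lexicographic comparisons
theorem pvPLt_iff (x y : Int × Int) :
    pvPLt x y = true ↔ (x.1 < y.1 ∨ (x.1 = y.1 ∧ x.2 < y.2)) := by
  simp [pvPLt]

-- "a ≤ b" relations used as sortedness invariants
def pvRP (a b : Int × Int) : Prop := pvPLt b a = false

theorem pvRP_of_lt {a b : Int × Int} (h : pvPLt a b = true) : pvRP a b := by
  rw [pvPLt_iff] at h
  rcases h with h | ⟨h1, h2⟩ <;>
    (unfold pvRP; rw [← Bool.not_eq_true, pvPLt_iff]; push_neg; constructor <;> omega)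

theorem pvRP_trans : Transitive pvRP := by
  intro a b c hab hbc
  unfold pvRP at *
  rw [← Bool.not_eq_true, pvPLt_iff] at *
  push_neg at hab hbc ⊢
  obtain ⟨h1, h2⟩ := hab; obtain ⟨h3, h4⟩ := hbc
  constructor <;> omega

-- pvHeapPush: permutation and sortedness
theorem pvHeapPush_perm {α : Type} (lt : α → α → Bool) (x : α) (h : List α) :
    (pvHeapPush lt x h).Perm (x :: h) := by
  induction h with
  | nil => simp [pvHeapPush]
  | cons y ys ih =>
    simp only [pvHeapPush]
    split
    · exact List.Perm.refl _
    · exact ((ih.cons y).trans (List.Perm.swap x y ys))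

theorem pvHeapPush_mem {α : Type} (lt : α → α → Bool) (x a : α) (h : List α) :
    a ∈ pvHeapPush lt x h ↔ a = x ∨ a ∈ h := by
  rw [(pvHeapPush_perm lt x h).mem_iff]; simp

theorem pvHeapPush_pairwise {α : Type} (lt : α → α → Bool) (R : α → α → Prop)
    (hlt : ∀ a b, lt a b = true → R a b) (hnlt : ∀ a b, lt a b = false → R b a)
    (htr : Transitive R) {x : α} {l : List α}
    (hl : l.Pairwise R) : (pvHeapPush lt x l).Pairwise R := by
  induction l with
  | nil => simp [pvHeapPush]
  | cons y ys ih =>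
    rcases List.pairwise_cons.mp hl with ⟨hy, hys⟩
    simp only [pvHeapPush]
    split
    · rename_i hxy
      refine List.pairwise_cons.mpr ⟨?_, hl⟩
      intro z hz
      rcases List.mem_cons.mp hz with rfl | hz
      · exact hlt _ _ hxy
      · exact htr (hlt _ _ hxy) (hy z hz)
    · rename_i hxy
      refine List.pairwise_cons.mpr ⟨?_, ih hys⟩
      intro z hz
      rcases (pvHeapPush_mem lt x z ys).mp hz with rfl | hz
      · exact hnlt _ _ (by simpa using hxy)
      · exact hy z hz

theorem pvHeapPush_sumFst (x : Int × Int) (h : List (Int × Int)) :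
    ((pvHeapPush pvPLt x h).map Prod.fst).sum = x.1 + (h.map Prod.fst).sum := by
  have := ((pvHeapPush_perm pvPLt x h).map Prod.fst).sum_eq
  simpa using this

-- the two release loops are the same function
theorem pvRelease_eq (q : List (Int × Int × Int)) (nd : List (Int × Int)) (now : Int) :
    pvReleaseA q nd now = pvReleaseB q nd now := by
  induction q generalizing nd with
  | nil => simp [pvReleaseA, pvReleaseB]
  | cons j rest ih =>
    obtain ⟨s, t, i⟩ := j
    simp only [pvReleaseA, pvReleaseB, ge_iff_le]
    split <;> simp [ih]

theorem pvReleaseA_pairwise (q : List (Int × Int × Int)) (nd : List (Int × Int)) (now : Int)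
    (h : nd.Pairwise pvRP) : (pvReleaseA q nd now).2.Pairwise pvRP := by
  induction q generalizing nd with
  | nil => simpa [pvReleaseA]
  | cons j rest ih =>
    obtain ⟨s, t, i⟩ := j
    simp only [pvReleaseA]
    split
    · exact ih _ (pvHeapPush_pairwise pvPLt pvRP (fun a b hab => pvRP_of_lt hab)
        (fun a b hab => hab) pvRP_trans h)
    · simpa

theorem pvReleaseA_stop (q : List (Int × Int × Int)) (nd : List (Int × Int)) (now : Int)
    (s t i : Int) (r : List (Int × Int × Int))
    (h : (pvReleaseA q nd now).1 = (s, t, i) :: r) : ¬ s ≤ now := by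
  induction q generalizing nd with
  | nil => simp [pvReleaseA] at h
  | cons j rest ih =>
    obtain ⟨s0, t0, i0⟩ := j
    simp only [pvReleaseA] at h
    split at h
    · exact ih _ h
    · rename_i hn
      simp at h
      obtain ⟨⟨h1, _⟩, _⟩ := h
      subst h1
      simpa using hn

-- the clock invariant: every remaining job's start is covered by the pending durations
def pvSumP (nd : List (Int × Int)) : Int := (nd.map Prod.fst).sum
def pvSumT (q : List (Int × Int × Int)) : Int := (q.map (fun j => j.2.1)).sum

def pvPI (que : List (Int × Int × Int)) (need : List (Int × Int)) (now : Int) : Prop :=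
  ∀ p, p < que.length → (que.getD p (0, 0, 0)).1 ≤ now + pvSumP need + pvSumT (que.take p)

theorem pvPI_pop (que : List (Int × Int × Int)) (t i now : Int) (ntl : List (Int × Int))
    (h : pvPI que ((t, i) :: ntl) now) : pvPI que ntl (now + t) := by
  intro p hp
  have := h p hp
  simp [pvSumP] at this ⊢
  linarith

theorem pvPI_release (que : List (Int × Int × Int)) (need : List (Int × Int)) (now : Int)
    (h : pvPI que need now) :
    pvPI (pvReleaseA que need now).1 (pvReleaseA que need now).2 now := by
  induction que generalizing need with
  | nil => intro p hp; simp [pvReleaseA] at hp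
  | cons j rest ih =>
    obtain ⟨s, t, i⟩ := j
    simp only [pvReleaseA]
    split
    · apply ih
      intro p hp
      have := h (p + 1) (by simp; omega)
      simp only [List.getD_cons_succ, List.take_succ_cons] at this
      simp [pvSumP, pvSumT, pvHeapPush_sumFst] at this ⊢
      linarith
    · exact h

-- A's tie-inspection branch never fires on a sorted need
theorem pvDead (t0 i0 t1 i1 : Int) (l : List (Int × Int))
    (h : ((t0, i0) :: (t1, i1) :: l).Pairwise pvRP) : (t0 == t1 && i0 > i1) = false := by
  rcases List.pairwise_cons.mp h with ⟨hy, _⟩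
  have h1 : pvRP (t0, i0) (t1, i1) := hy _ (by simp)
  unfold pvRP at h1
  rw [← Bool.not_eq_true, pvPLt_iff] at h1
  push_neg at h1
  simp only [Bool.and_eq_false_iff, beq_eq_false_iff_ne, ne_eq, decide_eq_false_iff_not, not_lt]
  by_cases ht : t0 = t1
  · right; simp at h1 ⊢; have := h1.2; omega
  · left; simp [ht]

-- the two main loops agree while the invariant rules out idle gaps
theorem pvLoop_eq (N : Nat) : ∀ (que : List (Int × Int × Int)) (need : List (Int × Int))
    (now : Int) (ans : List Int), que.length + need.length ≤ N →
    need.Pairwise pvRP → pvPI que need now →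
    pvLoopA que need now ans = pvLoopB que need now ans := by
  induction N with
  | zero =>
    intro que need now ans hN _ _
    have : need = [] := by
      cases need with
      | nil => rfl
      | cons a l => simp at hN
    subst this
    rw [pvLoopA, pvLoopB]
  | succ N ih =>
    intro que need now ans hN hsort hPI
    match need with
    | [] => rw [pvLoopA, pvLoopB]
    | (t0, i0) :: ntl =>
      -- the popped element and the resulting need, after the (dead) tie branch
      have hstep : ∀ (que' : List (Int × Int × Int)) (need' : List (Int × Int)),
          pvReleaseA que ntl (now + t0) = (que', need') →
          pvLoopA que' need' (now + t0) (ans ++ [i0]) =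
            pvLoopB que' need' (now + t0) (ans ++ [i0]) := by
        intro que' need' hrel
        apply ih
        · have h := pvReleaseA_length que ntl (now + t0)
          rw [hrel] at h
          simp at h hN ⊢
          omega
        · have := pvReleaseA_pairwise que ntl (now + t0) (List.Pairwise.of_cons hsort)
          rw [hrel] at this
          exact this
        · have := pvPI_release que ntl (now + t0) (pvPI_pop que t0 i0 now ntl hPI)
          rw [hrel] at this
          exact this
      have hnoidle : ∀ (s2 t2 i2 : Int) (r2 : List (Int × Int × Int)),
          pvReleaseA que ntl (now + t0) = ((s2, t2, i2) :: r2, []) → False := by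
        intro s2 t2 i2 r2 hrel
        have hPI2 := pvPI_release que ntl (now + t0) (pvPI_pop que t0 i0 now ntl hPI)
        rw [hrel] at hPI2
        have h0 := hPI2 0 (by simp)
        simp [pvSumP, pvSumT] at h0
        exact pvReleaseA_stop que ntl (now + t0) s2 t2 i2 r2 (by rw [hrel]) h0
      -- unfold one step of A
      have hA : pvLoopA que ((t0, i0) :: ntl) now ans =
          pvLoopA (pvReleaseA que ntl (now + t0)).1 (pvReleaseA que ntl (now + t0)).2
            (now + t0) (ans ++ [i0]) := by
        match hm : ntl with
        | [] => rw [pvLoopA]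
        | (t1, i1) :: ntl2 =>
          rw [pvLoopA]
          rw [pvDead t0 i0 t1 i1 ntl2 hsort]
          simp
      -- unfold one step of B and discharge each branch
      rw [hA, pvLoopB]
      split
      rename_i rest' ready' hst
      split
      · split
        · exfalso
          obtain rfl : ready' = [] := by assumption
          exact hnoidle _ _ _ _ ((pvRelease_eq que ntl (now + t0)).trans (by assumption))
        · have heq := (pvRelease_eq que ntl (now + t0)).trans (by assumption)
          rw [heq]
          exact hstep _ _ heq
      · have heq := (pvRelease_eq que ntl (now + t0)).trans (by assumption)
        rw [heq]
        exact hstep _ _ heq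

-- antisymmetry of the lexicographic order
-- A's heap-building fold produces the (strictly) sorted job list
theorem pvFoldPush_perm (l acc : List (Int × Int × Int)) :
    (l.foldl (fun q x => pvHeapPush pvTLt x q) acc).Perm (l ++ acc) := by
  induction l generalizing acc with
  | nil => simp
  | cons x l ih =>
    simp only [List.foldl_cons, List.cons_append]
    exact ((ih _).trans ((pvHeapPush_perm pvTLt x acc).append_left l)).trans
      List.perm_middle

-- B's mergesort and A's repeated heap-pushes build the same list
-- the raw job list, built by index or by zip/enumerate, is the same
theorem pvRaw_eq (start time : List Int) (h : start.length ≤ time.length) :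
    (List.range start.length).map (fun k => (start.getD k 0, time.getD k 0, (k : Int)))
      = (start.zip time).zipIdx.map (fun p => (p.1.1, p.1.2, (p.2 : Int))) := by
  apply List.ext_getElem
  · simp; omega
  · intro j h1 h2
    simp only [List.length_map, List.length_range] at h1
    have hj2 : j < time.length := lt_of_lt_of_le h1 h
    have hz : j < (start.zip time).length := by simp [List.length_zip]; omega
    simp only [List.getElem_map, List.getElem_range, List.getElem_zipIdx, List.getElem_zip]
    rw [List.getD_eq_getElem start 0 h1, List.getD_eq_getElem time 0 hj2]
    simp

theorem pvInsertBy_eq (x : Int × Int × Int) (l : List (Int × Int × Int)) :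
    PySem.List.insertBy pvTLt x l = pvHeapPush pvTLt x l := by
  induction l with
  | nil => simp [PySem.List.insertBy, pvHeapPush]
  | cons y ys ih => simp [PySem.List.insertBy, pvHeapPush]; split <;> simp [ih]

theorem pvBuild_eq (start time : List Int) (h : start.length ≤ time.length) :
    (List.range start.length).foldl
      (fun q k => pvHeapPush pvTLt (start.getD k 0, time.getD k 0, (k : Int)) q) []
      = pvJobs start time := by
  have h1 := List.foldl_map (f := fun k => (start.getD k 0, time.getD k 0, (k : Int)))
    (g := fun (q : List (Int × Int × Int)) x => pvHeapPush pvTLt x q)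
    (l := List.range start.length) (init := [])
  rw [← h1, pvRaw_eq start time h, pvJobs]
  simp only [pvInsertBy_eq]

theorem pvJobs_length (start time : List Int) :
    (pvJobs start time).length = min start.length time.length := by
  unfold pvJobs
  simp only [pvInsertBy_eq]
  have h := (pvFoldPush_perm
    ((start.zip time).zipIdx.map (fun p => (p.1.1, p.1.2, (p.2 : Int)))) []).length_eq
  simp [List.length_zipIdx, List.length_zip] at h ⊢
  omega

-- ===== VERDICT (by name: the statement is the Claim_ definition above) =====
theorem solution_spec : Claim_equal_solution := by
  unfold Claim_equal_solution
  intro start time _ hpre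
  obtain ⟨hn, hlen, hcond⟩ := hpre
  unfold Spec_solution solution solution_alt
  simp only [pvBuild_eq start time hlen]
  have hlj : (pvJobs start time).length = start.length := by
    rw [pvJobs_length]; omega
  cases hj : pvJobs start time with
  | nil => rfl
  | cons head rest =>
    obtain ⟨s0, t0, i0⟩ := head
    show pvLoopA rest (pvHeapPush pvPLt (t0, i0) []) 0 [] = pvLoopB rest [(t0, i0)] 0 []
    have hrl : rest.length = start.length - 1 := by
      rw [hj] at hlj; simp at hlj; omega
    apply pvLoop_eq (rest.length + 1) rest [(t0, i0)] 0 []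
    · simp [pvHeapPush]
    · simp [pvRP]
    · intro p hp
      have hk := hcond p (by rw [List.mem_range]; omega)
      rw [hj] at hk
      simp only [List.getD_cons_succ, List.take_succ_cons, List.map_cons, List.sum_cons] at hk
      simp only [pvSumP, pvSumT, List.map_cons, List.map_nil, List.sum_cons, List.sum_nil]
      linarith
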